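-- pv_equiv track=rewrite | github.com/ankitpriyarup/online-judge | codeforces/849/b.py | covers
-- ===== SOURCE A (Python) =====
-- def covers(n, a, num, den):
--     # a[i] = num / den * i + a[0]
--     # den * (a[i] - a[0]) = num * i
--
--     start = a[0]
--     used = [False] * n
--     used[0] = True
--
--     for i in range(1, n):
--         if den * (a[i] - a[0]) == num * i:
--             used[i] = True
--
--     first_unused = -1
--     for i in range(n):
--         if not used[i]:
--             first_unused = i
--             break
--
--     if first_unused == -1:
--         return False
--
--     for i in range(n):
--         if used[i]:
--             continue
--
--         if den * (a[i] - a[first_unused]) == num * (i - first_unused):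
--             used[i] = True
--
--     return all(used)
-- ===== SOURCE B (Python) =====
-- def covers(n, a, num, den):
--     k0 = den * a[0]
--     others = set()
--     for i in range(n):
--         key = den * a[i] - num * i
--         if key != k0:
--             others.add(key)
--     return len(others) == 1
-- ===== Notes on version B (the rewrite author's own statement) =====
-- stated objective: simpler
-- what changed: Replaces the used[] boolean array and the three guarded passes (mark line A, scan for first unused, mark line B, all()) by one pass that collects the distinct intercept keys den*a[i]-num*i differing from den*a[0] into a set and returns whether exactly one such class exists.
import Mathlib
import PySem

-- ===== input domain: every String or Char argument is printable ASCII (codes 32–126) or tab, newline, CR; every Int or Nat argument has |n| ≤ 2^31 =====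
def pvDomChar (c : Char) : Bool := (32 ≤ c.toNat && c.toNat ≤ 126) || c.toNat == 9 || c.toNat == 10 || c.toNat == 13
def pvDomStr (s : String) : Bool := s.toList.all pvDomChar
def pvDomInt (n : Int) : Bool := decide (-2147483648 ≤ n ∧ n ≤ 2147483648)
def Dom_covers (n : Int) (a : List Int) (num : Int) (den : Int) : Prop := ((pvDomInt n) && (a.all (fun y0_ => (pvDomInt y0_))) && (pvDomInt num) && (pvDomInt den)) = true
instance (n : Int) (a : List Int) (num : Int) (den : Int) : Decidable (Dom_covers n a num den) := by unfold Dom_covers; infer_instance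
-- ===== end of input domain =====

-- B replaces A's used[] boolean array and its three guarded passes by one pass that collects the
-- distinct non-base intercept keys den*a[i]-num*i into a set and checks that exactly one class exists.

-- ===== PORT A =====
-- helper: the 'for i in range(n): if not used[i]: first_unused = i; break' scan of A
def coversFindFU (used : List Bool) : List Int → Int
  | [] => -1
  | i :: rest => if !(PySem.List.pyGetD used i false) then i else coversFindFU used rest

def covers (n : Int) (a : List Int) (num : Int) (den : Int) : Bool :=
  let used0 := (List.replicate n.toNat false).set 0 true
  let used1 := (PySem.List.pyRange 1 n 1).foldl
    (fun u i => if den * (PySem.List.pyGetD a i 0 - PySem.List.pyGetD a 0 0) == num * i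
                then u.set i.toNat true else u) used0
  let fu := coversFindFU used1 (PySem.List.pyRange 0 n 1)
  if fu == -1 then false
  else
    ((PySem.List.pyRange 0 n 1).foldl
      (fun u i => if PySem.List.pyGetD u i false then u
                  else if den * (PySem.List.pyGetD a i 0 - PySem.List.pyGetD a fu 0) == num * (i - fu)
                  then u.set i.toNat true else u) used1).all (fun b => b)

-- ===== PORT B =====
def covers_alt (n : Int) (a : List Int) (num : Int) (den : Int) : Bool :=
  let k0 := den * PySem.List.pyGetD a 0 0
  let others := (PySem.List.pyRange 0 n 1).foldl
    (fun s i => if (den * PySem.List.pyGetD a i 0 - num * i) != k0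
                then PySem.Set.add s (den * PySem.List.pyGetD a i 0 - num * i) else s)
    ([] : PySem.Set Int)
  others.length == 1

-- ===== PRECONDITION & SPEC =====
-- Pre_ excludes exactly the inputs where the Python A raises IndexError: n < 1 (used[0] = True on an
-- empty used array) or n > len(a) (a[i] out of range in the first loop).
def Pre_covers (n : Int) (a : List Int) (num : Int) (den : Int) : Prop :=
  1 ≤ n ∧ n ≤ (a.length : Int)
instance (n : Int) (a : List Int) (num : Int) (den : Int) : Decidable (Pre_covers n a num den) := by
  unfold Pre_covers; infer_instance

def pvWitness_covers : Int × List Int × Int × Int := (3, [0, 1, 5], 1, 1)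

def Spec_covers (n : Int) (a : List Int) (num : Int) (den : Int) (out : Bool) : Prop := out = covers_alt n a num den
instance (n : Int) (a : List Int) (num : Int) (den : Int) (out : Bool) : Decidable (Spec_covers n a num den out) := by unfold Spec_covers; infer_instance

-- ===== CLAIM (what is proved, stated in full; the proofs are below) =====
def Claim_equal_covers : Prop := ∀ (n : Int) (a : List Int) (num : Int) (den : Int), Dom_covers n a num den → Pre_covers n a num den → Spec_covers n a num den (covers n a num den)

-- ===== LEMMAS AND PROOFS =====

theorem getD_set_true (u : List Bool) (k j : Nat) (hj : j < u.length) :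
    (u.set k true).getD j false = if k = j then true else u.getD j false := by
  rw [List.getD_eq_getElem?_getD, List.getElem?_set, List.getD_eq_getElem?_getD]
  by_cases h : k = j
  · subst h; simp [hj]
  · simp [h]

theorem len_foldl_set1 (c : Int → Bool) (l : List Int) (u : List Bool) :
    (l.foldl (fun u i => if c i then u.set i.toNat true else u) u).length = u.length := by
  induction l generalizing u with
  | nil => rfl
  | cons i rest ih =>
    simp only [List.foldl_cons]
    rw [ih]
    split <;> simp

theorem getD_foldl_set1 (c : Int → Bool) (l : List Int) (h0 : ∀ i ∈ l, 0 ≤ i)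
    (u : List Bool) (j : Nat) (hj : j < u.length) :
    (l.foldl (fun u i => if c i then u.set i.toNat true else u) u).getD j false
      = (u.getD j false || l.any (fun i => i == (j : Int) && c i)) := by
  induction l generalizing u with
  | nil => simp
  | cons i rest ih =>
    have hi : 0 ≤ i := h0 i (by simp)
    have hlen : j < (if c i then u.set i.toNat true else u).length := by
      split <;> simp [hj]
    have hstep : (if c i then u.set i.toNat true else u).getD j false
        = (u.getD j false || (i == (j : Int) && c i)) := by
      by_cases hc : c i
      · rw [if_pos hc, getD_set_true _ _ _ hj]
        by_cases he : i = (j : Int)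
        · subst he
          simp [hc]
        · have ht : i.toNat ≠ j := by omega
          simp [ht, he]
      · simp [hc]
    simp only [List.foldl_cons, List.any_cons]
    rw [ih (fun x hx => h0 x (by simp [hx])) _ hlen, hstep, Bool.or_assoc]

theorem len_foldl_set2 (c : Int → Bool) (l : List Int) (u : List Bool) :
    (l.foldl (fun u i => if PySem.List.pyGetD u i false then u
                         else if c i then u.set i.toNat true else u) u).length = u.length := by
  induction l generalizing u with
  | nil => rfl
  | cons i rest ih =>
    simp only [List.foldl_cons]
    rw [ih]
    split
    · rfl
    · split <;> simp

theorem getD_foldl_set2 (c : Int → Bool) (l : List Int) (h0 : ∀ i ∈ l, 0 ≤ i)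
    (u : List Bool) (j : Nat) (hj : j < u.length) :
    (l.foldl (fun u i => if PySem.List.pyGetD u i false then u
                         else if c i then u.set i.toNat true else u) u).getD j false
      = (u.getD j false || l.any (fun i => i == (j : Int) && c i)) := by
  induction l generalizing u with
  | nil => simp
  | cons i rest ih =>
    have hi : 0 ≤ i := h0 i (by simp)
    have hgd : PySem.List.pyGetD u i false = u.getD i.toNat false :=
      PySem.List.pyGetD_of_nonneg u false hi
    have hlen : j < (if PySem.List.pyGetD u i false then u
                     else if c i then u.set i.toNat true else u).length := by
      split
      · exact hj
      · split <;> simp [hj]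
    have hstep : (if PySem.List.pyGetD u i false then u
                  else if c i then u.set i.toNat true else u).getD j false
        = (u.getD j false || (i == (j : Int) && c i)) := by
      by_cases hr : PySem.List.pyGetD u i false
      · rw [if_pos hr]
        by_cases he : i = (j : Int)
        · subst he
          have hjt : u.getD j false = true := by
            rw [hgd] at hr; simpa using hr
          rw [hjt]
          simp
        · have : (i == (j:Int)) = false := by simp [he]
          simp [this]
      · rw [if_neg hr]
        by_cases hc : c i
        · rw [if_pos hc, getD_set_true _ _ _ hj]
          by_cases he : i = (j : Int)
          · subst he
            simp [hc]
          · have ht : i.toNat ≠ j := by omega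
            simp [ht, he]
        · simp [hc]
    simp only [List.foldl_cons, List.any_cons]
    rw [ih (fun x hx => h0 x (by simp [hx])) _ hlen, hstep, Bool.or_assoc]

theorem findFU_spec (used : List Bool) (l : List Int) :
    coversFindFU used l = -1 ∨
      (coversFindFU used l ∈ l ∧ PySem.List.pyGetD used (coversFindFU used l) false = false) := by
  induction l with
  | nil => left; rfl
  | cons i rest ih =>
    by_cases h : PySem.List.pyGetD used i false
    · rcases ih with h1 | ⟨h2, h3⟩
      · left; simpa [coversFindFU, h] using h1
      · right; constructor
        · simp [coversFindFU, h, h2]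
        · simpa [coversFindFU, h] using h3
    · right
      constructor
      · simp [coversFindFU, h]
      · simp only [coversFindFU, h]
        simpa using h

theorem findFU_neg_one_iff (used : List Bool) (l : List Int) (h0 : ∀ i ∈ l, 0 ≤ i) :
    coversFindFU used l = -1 ↔ ∀ i ∈ l, PySem.List.pyGetD used i false = true := by
  induction l with
  | nil => simp [coversFindFU]
  | cons i rest ih =>
    have hi : 0 ≤ i := h0 i (by simp)
    by_cases h : PySem.List.pyGetD used i false
    · rw [show coversFindFU used (i :: rest) = coversFindFU used rest by simp [coversFindFU, h]]
      rw [ih (fun x hx => h0 x (by simp [hx]))]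
      constructor
      · intro hall x hx
        rcases List.mem_cons.mp hx with h1 | h1
        · subst h1; exact h
        · exact hall x h1
      · intro hall x hx; exact hall x (by simp [hx])
    · rw [show coversFindFU used (i :: rest) = i by simp [coversFindFU, h]]
      constructor
      · intro h1; omega
      · intro hall; exact absurd (hall i (by simp)) h

theorem nodup_const_len_le_one {s : List Int} (v : Int) (hn : s.Nodup) (h : ∀ x ∈ s, x = v) :
    s.length ≤ 1 := by
  match s, hn with
  | [], _ => simp
  | [x], _ => simp
  | x :: y :: t, hn =>
    exfalso
    have hx : x = v := h x (by simp)
    have hy : y = v := h y (by simp)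
    have : x ≠ y := by
      have := List.nodup_cons.mp hn
      exact fun he => this.1 (he ▸ List.mem_cons_self ..)
    exact this (hx.trans hy.symm)

theorem ofList_len_one_iff (K : List Int) :
    ((PySem.Set.ofList K).length = 1) ↔ ∃ v, K ≠ [] ∧ ∀ x ∈ K, x = v := by
  constructor
  · intro h
    obtain ⟨v, hv⟩ := List.length_eq_one_iff.mp h
    refine ⟨v, ?_, ?_⟩
    · rintro rfl
      rw [PySem.Set.ofList_nil] at hv
      simp at hv
    · intro x hx
      have hm : x ∈ PySem.Set.ofList K := (PySem.Set.mem_ofList K x).mpr hx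
      rw [hv] at hm
      simpa using hm
  · rintro ⟨v, hne, hall⟩
    have hnd := PySem.Set.nodup_ofList (xs := K)
    have hle : (PySem.Set.ofList K).length ≤ 1 :=
      nodup_const_len_le_one v hnd (fun x hx => hall x ((PySem.Set.mem_ofList K x).mp hx))
    have hpos : 0 < (PySem.Set.ofList K).length := by
      obtain ⟨x, hx⟩ := List.exists_mem_of_ne_nil K hne
      exact List.length_pos_of_mem ((PySem.Set.mem_ofList K x).mpr hx)
    omega

def pvKey (a : List Int) (num den i : Int) : Int := den * PySem.List.pyGetD a i 0 - num * i

def pvKeys (n : Int) (a : List Int) (num den : Int) : List Int :=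
  ((PySem.List.pyRange 0 n 1).filter
      (fun i => pvKey a num den i != den * PySem.List.pyGetD a 0 0)).map (pvKey a num den)

theorem alt_iff (n : Int) (a : List Int) (num den : Int) :
    covers_alt n a num den = true ↔
      ∃ v, pvKeys n a num den ≠ [] ∧ ∀ x ∈ pvKeys n a num den, x = v := by
  show ((PySem.List.pyRange 0 n 1).foldl
      (fun s i => if (den * PySem.List.pyGetD a i 0 - num * i) != den * PySem.List.pyGetD a 0 0
                  then PySem.Set.add s (den * PySem.List.pyGetD a i 0 - num * i) else s)
      ([] : PySem.Set Int)).length == 1 ↔ _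
  rw [PySem.List.foldl_if_eq_foldl_filter
        (p := fun i => (den * PySem.List.pyGetD a i 0 - num * i) != den * PySem.List.pyGetD a 0 0)
        (f := fun s i => PySem.Set.add s (den * PySem.List.pyGetD a i 0 - num * i)),
      ← List.foldl_map (f := fun i => den * PySem.List.pyGetD a i 0 - num * i)
        (g := PySem.Set.add),
      ← PySem.Set.ofList_eq_foldl, beq_iff_eq]
  exact ofList_len_one_iff _

theorem covers_eq_alt (n : Int) (a : List Int) (num : Int) (den : Int) (h1 : 1 ≤ n) :
    covers n a num den = covers_alt n a num den := by
  rw [Bool.eq_iff_iff, alt_iff]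
  simp only [covers]
  set R : List Int := PySem.List.pyRange 0 n 1 with hR
  set u1 : List Bool := (PySem.List.pyRange 1 n 1).foldl
      (fun u i => if den * (PySem.List.pyGetD a i 0 - PySem.List.pyGetD a 0 0) == num * i
                  then u.set i.toNat true else u)
      ((List.replicate n.toNat false).set 0 true) with hu1
  have hRmem : ∀ i : Int, i ∈ R ↔ 0 ≤ i ∧ i < n := by
    intro i; rw [hR]; exact PySem.List.mem_pyRange_one
  have hc1 : ∀ i : Int,
      ((den * (PySem.List.pyGetD a i 0 - PySem.List.pyGetD a 0 0) == num * i) = true)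
        ↔ pvKey a num den i = den * PySem.List.pyGetD a 0 0 := by
    intro i
    rw [beq_iff_eq]
    have hms := mul_sub den (PySem.List.pyGetD a i 0) (PySem.List.pyGetD a 0 0)
    unfold pvKey
    constructor <;> intro h <;> linarith
  have hlen1 : u1.length = n.toNat := by
    rw [hu1, len_foldl_set1]; simp
  have hU1 : ∀ j : Nat, j < n.toNat →
      (u1.getD j false = true ↔ pvKey a num den ↑j = den * PySem.List.pyGetD a 0 0) := by
    intro j hj
    rw [hu1, getD_foldl_set1 _ _ (fun i hi => by
          have := PySem.List.mem_pyRange_one.mp hi; omega) _ j (by simp [hj]),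
        getD_set_true _ 0 j (by simp [hj]), Bool.or_eq_true, List.any_eq_true]
    by_cases hj0 : j = 0
    · subst hj0
      constructor
      · intro _
        simp [pvKey]
      · intro _; left; rfl
    · rw [if_neg (by omega), List.getD_replicate false hj]
      constructor
      · rintro (h | ⟨i, hi, hb⟩)
        · simp at h
        · rcases Bool.and_eq_true_iff.mp hb with ⟨he, hc⟩
          have : i = (j : Int) := by simpa using he
          subst this
          exact (hc1 _).mp hc
      · intro h
        right
        refine ⟨(j : Int), ?_, ?_⟩
        · rw [PySem.List.mem_pyRange_one]; omega
        · rw [Bool.and_eq_true]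
          exact ⟨by simp, (hc1 _).mpr h⟩
  have hKmem : ∀ x, x ∈ pvKeys n a num den ↔
      ∃ i, i ∈ R ∧ pvKey a num den i ≠ den * PySem.List.pyGetD a 0 0 ∧ pvKey a num den i = x := by
    intro x
    rw [pvKeys]
    simp only [List.mem_map, List.mem_filter, bne_iff_ne, ne_eq]
    constructor
    · rintro ⟨i, ⟨hiR, hne⟩, rfl⟩
      exact ⟨i, hiR, hne, rfl⟩
    · rintro ⟨i, hiR, hne, rfl⟩
      exact ⟨i, ⟨hiR, hne⟩, rfl⟩
  by_cases hall : coversFindFU u1 R = -1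
  · rw [hall]
    simp only [BEq.rfl, if_pos]
    constructor
    · intro h; simp at h
    · rintro ⟨v, hne, -⟩
      exfalso
      apply hne
      rw [pvKeys, List.map_eq_nil_iff, List.filter_eq_nil_iff]
      intro i hiR
      have h0 : 0 ≤ i := ((hRmem i).mp hiR).1
      have hget := (findFU_neg_one_iff u1 R (fun i hi => ((hRmem i).mp hi).1)).mp hall i hiR
      rw [PySem.List.pyGetD_of_nonneg u1 false h0] at hget
      have hlt : i.toNat < n.toNat := by
        have := ((hRmem i).mp hiR).2; omega
      have := (hU1 i.toNat hlt).mp hget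
      rw [Int.toNat_of_nonneg h0] at this
      simp [this]
  · have hspec := findFU_spec u1 R
    rcases hspec with h | ⟨hmem, hgetfu⟩
    · exact absurd h hall
    set fu : Int := coversFindFU u1 R with hfu
    have hfu0 : 0 ≤ fu := ((hRmem fu).mp hmem).1
    have hfun : fu < n := ((hRmem fu).mp hmem).2
    have hPfu : pvKey a num den fu ≠ den * PySem.List.pyGetD a 0 0 := by
      intro h
      rw [PySem.List.pyGetD_of_nonneg u1 false hfu0] at hgetfu
      have hlt : fu.toNat < n.toNat := by omega
      have := (hU1 fu.toNat hlt).mpr (by rw [Int.toNat_of_nonneg hfu0]; exact h)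
      rw [this] at hgetfu
      exact absurd hgetfu (by simp)
    rw [if_neg (by simp; omega)]
    -- characterize used2
    have hc2 : ∀ i : Int,
        ((den * (PySem.List.pyGetD a i 0 - PySem.List.pyGetD a fu 0) == num * (i - fu)) = true)
          ↔ pvKey a num den i = pvKey a num den fu := by
      intro i
      rw [beq_iff_eq]
      have hms1 := mul_sub den (PySem.List.pyGetD a i 0) (PySem.List.pyGetD a fu 0)
      have hms2 := mul_sub num i fu
      unfold pvKey
      constructor <;> intro h <;> linarith
    have hlen2 : (R.foldl
        (fun u i => if PySem.List.pyGetD u i false then u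
                    else if den * (PySem.List.pyGetD a i 0 - PySem.List.pyGetD a fu 0) == num * (i - fu)
                    then u.set i.toNat true else u) u1).length = n.toNat := by
      rw [len_foldl_set2, hlen1]
    have hU2 : ∀ j : Nat, j < n.toNat →
        ((R.foldl
            (fun u i => if PySem.List.pyGetD u i false then u
                        else if den * (PySem.List.pyGetD a i 0 - PySem.List.pyGetD a fu 0) == num * (i - fu)
                        then u.set i.toNat true else u) u1).getD j false = true
          ↔ (pvKey a num den ↑j = den * PySem.List.pyGetD a 0 0 ∨
             pvKey a num den ↑j = pvKey a num den fu)) := by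
      intro j hj
      rw [getD_foldl_set2 _ _ (fun i hi => ((hRmem i).mp hi).1) _ j (by omega),
          Bool.or_eq_true, List.any_eq_true]
      constructor
      · rintro (h | ⟨i, hiR, hb⟩)
        · exact Or.inl ((hU1 j hj).mp h)
        · rcases Bool.and_eq_true_iff.mp hb with ⟨he, hc⟩
          have : i = (j : Int) := by simpa using he
          subst this
          exact Or.inr ((hc2 _).mp hc)
      · rintro (h | h)
        · exact Or.inl ((hU1 j hj).mpr h)
        · refine Or.inr ⟨(j : Int), (hRmem _).mpr (by omega), ?_⟩
          rw [Bool.and_eq_true]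
          exact ⟨by simp, (hc2 _).mpr h⟩
    rw [List.all_eq_true]
    constructor
    · intro hA
      refine ⟨pvKey a num den fu, ?_, ?_⟩
      · apply List.ne_nil_of_mem (a := pvKey a num den fu)
        exact (hKmem _).mpr ⟨fu, hmem, hPfu, rfl⟩
      · intro x hx
        obtain ⟨i, hiR, hne, rfl⟩ := (hKmem x).mp hx
        have h0 : 0 ≤ i := ((hRmem i).mp hiR).1
        have hlt : i.toNat < n.toNat := by
          have := ((hRmem i).mp hiR).2; omega
        have hilen : i.toNat < (R.foldl
            (fun u i => if PySem.List.pyGetD u i false then u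
                        else if den * (PySem.List.pyGetD a i 0 - PySem.List.pyGetD a fu 0) == num * (i - fu)
                        then u.set i.toNat true else u) u1).length := by
          rw [hlen2]; exact hlt
        have hb := hA _ (List.getElem_mem hilen)
        rw [← List.getD_eq_getElem _ false hilen] at hb
        have := (hU2 i.toNat hlt).mp hb
        rw [Int.toNat_of_nonneg h0] at this
        rcases this with h | h
        · exact absurd h hne
        · exact h
    · rintro ⟨v, hne, hall2⟩ b hb
      have hvfu : v = pvKey a num den fu := by
        exact (hall2 _ ((hKmem _).mpr ⟨fu, hmem, hPfu, rfl⟩)).symm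
      obtain ⟨j, hjlt, rfl⟩ := List.mem_iff_getElem.mp hb
      rw [← List.getD_eq_getElem _ false hjlt]
      have hjn : j < n.toNat := by rw [hlen2] at hjlt; exact hjlt
      rw [hU2 j hjn]
      by_cases hP : pvKey a num den ↑j = den * PySem.List.pyGetD a 0 0
      · exact Or.inl hP
      · right
        have hjR : (j : Int) ∈ R := (hRmem _).mpr (by omega)
        have := hall2 _ ((hKmem _).mpr ⟨(j : Int), hjR, hP, rfl⟩)
        rw [this, hvfu]

-- ===== VERDICT (by name: the statement is the Claim_ definition above) =====
theorem covers_spec : Claim_equal_covers := by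
  intro n a num den _ hpre
  unfold Spec_covers
  exact covers_eq_alt n a num den hpre.1
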